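-- pv_equiv track=rewrite | github.com/microsoft/social-reasoning-bench | packages/sage-benchmark/sage_benchmark/cli.py | _split_on_and
-- ===== SOURCE A (Python) =====
-- def _split_on_and(argv: list[str]) -> list[list[str]]:
--     """Split argv on ``--and`` separator into groups.
--
--     Example::
--
--         ['experiments/', '--set', 'model=X', '--and', '--set', 'model=Y']
--         -> [['experiments/', '--set', 'model=X'], ['--set', 'model=Y']]
--
--     Args:
--         argv: Raw command-line arguments to split.
--
--     Returns:
--         A list of argument groups, split at each ``--and`` separator.
--     """
--     groups: list[list[str]] = [[]]
--     for arg in argv: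
--         if arg == "--and":
--             groups.append([])
--         else:
--             groups[-1].append(arg)
--     return groups
-- ===== SOURCE B (Python) =====
-- def _split_on_and(argv):
--     positions = [i for i, a in enumerate(argv) if a == "--and"]
--     starts = [0] + [p + 1 for p in positions]
--     ends = positions + [len(argv)]
--     return [argv[s:e] for s, e in zip(starts, ends)]
-- ===== Notes on version B (the rewrite author's own statement) =====
-- stated objective: alternative
-- what changed: B is two-phase: it first computes the table of '--and' separator indices with enumerate, then produces each group as a single slice between consecutive boundaries, instead of A's one-pass loop that appends element-by-element to the last group of a growing list of lists.
import Mathlib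
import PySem

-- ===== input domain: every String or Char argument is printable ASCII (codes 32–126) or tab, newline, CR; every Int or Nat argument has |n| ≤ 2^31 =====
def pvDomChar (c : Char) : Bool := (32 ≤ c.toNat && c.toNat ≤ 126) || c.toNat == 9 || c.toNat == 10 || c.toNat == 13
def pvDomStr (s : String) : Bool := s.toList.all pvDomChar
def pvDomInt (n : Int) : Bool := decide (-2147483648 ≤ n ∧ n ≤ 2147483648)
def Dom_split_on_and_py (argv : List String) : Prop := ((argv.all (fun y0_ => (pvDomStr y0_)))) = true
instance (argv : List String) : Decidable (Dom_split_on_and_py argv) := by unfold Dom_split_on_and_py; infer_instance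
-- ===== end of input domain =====

-- B splits argv in two phases (separator-index table, then one slice per group) instead of
-- A's single pass appending to the last group; alternative decomposition, same cost.

-- ===== PORT A =====
-- A: one pass; `groups[-1].append(arg)` is transcribed functionally as replacing the last group.
def split_on_and_py (argv : List String) : List (List String) :=
  argv.foldl
    (fun groups arg =>
      if arg = "--and" then groups ++ [[]]
      else groups.dropLast ++ [groups.getLastD [] ++ [arg]])
    [[]]

-- ===== PORT B =====
def split_on_and_py_alt (argv : List String) : List (List String) :=
  let positions : List Int :=
    (PySem.List.enumerate argv 0).filterMap
      (fun p => if p.2 = "--and" then some p.1 else none)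
  let starts : List Int := 0 :: positions.map (· + 1)
  let ends : List Int := positions ++ [(argv.length : Int)]
  (starts.zip ends).map (fun p => PySem.List.slice argv (some p.1) (some p.2))

-- ===== PRECONDITION & SPEC =====
def Spec_split_on_and_py (argv : List String) (out : List (List String)) : Prop := out = split_on_and_py_alt argv
instance (argv : List String) (out : List (List String)) : Decidable (Spec_split_on_and_py argv out) := by unfold Spec_split_on_and_py; infer_instance

-- ===== CLAIM (what is proved, stated in full; the proofs are below) =====
def Claim_equal_split_on_and_py : Prop := ∀ (argv : List String), Dom_split_on_and_py argv → Spec_split_on_and_py argv (split_on_and_py argv)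

-- ===== LEMMAS AND PROOFS =====

-- Reference recursion: the split both programs compute.
def sAux : List String → List (List String)
  | [] => [[]]
  | a :: t =>
    if a = "--and" then [] :: sAux t
    else
      match sAux t with
      | [] => [[a]]
      | h :: r => (a :: h) :: r

lemma sAux_ne_nil (xs : List String) : sAux xs ≠ [] := by
  cases xs with
  | nil => simp [sAux]
  | cons a t =>
    simp only [sAux]
    split_ifs
    · simp
    · cases h : sAux t <;> simp

-- prepend c to the first group
def consHead (c : List String) : List (List String) → List (List String)
  | [] => [c]
  | h :: r => (c ++ h) :: r

lemma A_fold (argv : List String) : ∀ (gs : List (List String)) (c : List String),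
    argv.foldl
      (fun groups arg =>
        if arg = "--and" then groups ++ [[]]
        else groups.dropLast ++ [groups.getLastD [] ++ [arg]])
      (gs ++ [c]) = gs ++ consHead c (sAux argv) := by
  induction argv with
  | nil => intro gs c; simp [sAux, consHead]
  | cons a t ih =>
    intro gs c
    simp only [List.foldl_cons]
    by_cases ha : a = "--and"
    · have h1 : (gs ++ [c]) ++ [([] : List String)] = (gs ++ [c]) ++ [[]] := rfl
      rw [if_pos ha, List.append_assoc] at *
      have := ih (gs ++ [c]) []
      rw [show gs ++ ([c] ++ [[]]) = (gs ++ [c]) ++ [[]] by simp, this]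
      cases h : sAux t with
      | nil => exact absurd h (sAux_ne_nil t)
      | cons h0 r => simp [sAux, ha, consHead, h]
    · rw [if_neg ha]
      have hd : (gs ++ [c]).dropLast = gs := by simp
      have hl : (gs ++ [c]).getLastD [] = c := by simp
      rw [hd, hl, ih gs (c ++ [a])]
      cases h : sAux t with
      | nil => exact absurd h (sAux_ne_nil t)
      | cons h0 r => simp [sAux, ha, consHead, h]

lemma A_eq_sAux (argv : List String) : split_on_and_py argv = sAux argv := by
  have := A_fold argv [] []
  simp only [List.nil_append] at this
  rw [split_on_and_py, this]
  cases h : sAux argv with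
  | nil => exact absurd h (sAux_ne_nil argv)
  | cons h0 r => simp [consHead]

-- Nat-level separator positions
def natPos : List String → List Nat
  | [] => []
  | a :: t => if a = "--and" then 0 :: (natPos t).map (· + 1) else (natPos t).map (· + 1)

lemma map_cast_shift (P : List Nat) (s : Int) :
    P.map (fun k : Nat => (s + 1) + (k : Int))
      = (P.map (fun k : Nat => k + 1)).map (fun k : Nat => s + (k : Int)) := by
  rw [List.map_map]
  exact List.map_congr_left (fun k _ => by simp only [Function.comp_def]; push_cast; ring)

lemma filterMap_enumerate (argv : List String) : ∀ (s : Int),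
    (PySem.List.enumerate argv s).filterMap
      (fun p => if p.2 = "--and" then some p.1 else none)
      = (natPos argv).map (fun k : Nat => s + (k : Int)) := by
  induction argv with
  | nil => intro s; simp [PySem.List.enumerate_nil, natPos]
  | cons a t ih =>
    intro s
    rw [PySem.List.enumerate_cons, List.filterMap_cons]
    by_cases ha : a = "--and"
    · simp only [ha, if_pos, natPos, ih (s + 1), map_cast_shift, List.map_cons]
      norm_num
    · simp only [ha, ite_false, natPos, ih (s + 1), map_cast_shift]

-- Nat-level segments
def segsN (xs : List String) (P : List Nat) (n : Nat) : List (List String) :=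
  ((0 :: P.map (· + 1)).zip (P ++ [n])).map (fun p => (xs.drop p.1).take (p.2 - p.1))

lemma segs_shift (a : String) (t : List String) (ss es : List Nat) :
    ((ss.map (· + 1)).zip (es.map (· + 1))).map
        (fun p => ((a :: t).drop p.1).take (p.2 - p.1))
      = (ss.zip es).map (fun p => (t.drop p.1).take (p.2 - p.1)) := by
  rw [List.zip_map, List.map_map]
  exact List.map_congr_left (fun p _ => by
    simp [Prod.map, List.drop_succ_cons, Nat.succ_sub_succ])

lemma segsN_and (a : String) (t : List String) (P : List Nat) :
    segsN (a :: t) (0 :: P.map (· + 1)) (t.length + 1) = [] :: segsN t P t.length := by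
  simp only [segsN, List.map_cons, List.zip_cons_cons, List.map_cons, List.cons_append]
  rw [show P.map (· + 1) ++ [t.length + 1] = (P ++ [t.length]).map (· + 1) by simp]
  rw [show (1 : Nat) :: (P.map (· + 1)).map (· + 1) = ((0 :: P.map (· + 1)).map (· + 1)) by simp]
  rw [segs_shift]
  simp

lemma segsN_keep (a : String) (t : List String) (P : List Nat) :
    segsN (a :: t) (P.map (· + 1)) (t.length + 1)
      = consHead [a] (segsN t P t.length) := by
  cases P with
  | nil =>
    simp [segsN, consHead, List.take_succ_cons]
  | cons p ps =>
    simp only [segsN, List.map_cons, List.zip_cons_cons, List.cons_append, List.map_cons]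
    rw [show ps.map (· + 1) ++ [t.length + 1] = (ps ++ [t.length]).map (· + 1) by simp]
    rw [show (p + 1 + 1) :: (ps.map (· + 1)).map (· + 1)
          = ((p + 1) :: ps.map (· + 1)).map (· + 1) by simp]
    rw [segs_shift]
    simp [consHead, List.take_succ_cons]

lemma segsN_eq_sAux (argv : List String) :
    segsN argv (natPos argv) argv.length = sAux argv := by
  induction argv with
  | nil => simp [segsN, natPos, sAux]
  | cons a t ih =>
    by_cases ha : a = "--and"
    · simp only [natPos, ha, if_pos, List.length_cons]
      rw [segsN_and, ih]
      simp [sAux]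
    · simp only [natPos, ha, if_neg, List.length_cons, not_false_iff]
      rw [segsN_keep, ih]
      cases h : sAux t with
      | nil => exact absurd h (sAux_ne_nil t)
      | cons h0 r => simp [sAux, ha, consHead, h]

lemma B_eq_sAux (argv : List String) : split_on_and_py_alt argv = sAux argv := by
  rw [split_on_and_py_alt]
  simp only [filterMap_enumerate argv 0, zero_add]
  have hsh : ((natPos argv).map (fun k : Nat => (k : Int))).map (fun x : Int => x + 1)
      = ((natPos argv).map (fun k : Nat => k + 1)).map (fun k : Nat => (k : Int)) := by
    have h := map_cast_shift (natPos argv) 0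
    simp only [zero_add] at h
    rw [← h, List.map_map]
    exact List.map_congr_left (fun k _ => by simp only [Function.comp_def]; ring)
  have h0 : (0 : Int) :: ((natPos argv).map (fun k : Nat => k + 1)).map (fun k : Nat => (k : Int))
      = ((0 :: (natPos argv).map (fun k : Nat => k + 1)).map (fun k : Nat => (k : Int))) := by
    rw [List.map_cons, Nat.cast_zero]
  have he : ((natPos argv).map (fun k : Nat => (k : Int))) ++ [(argv.length : Int)]
      = ((natPos argv ++ [argv.length]).map (fun k : Nat => (k : Int))) := by
    simp
  rw [hsh, h0, he, ← segsN_eq_sAux, segsN, List.zip_map, List.map_map]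
  exact List.map_congr_left (fun p _ => by
    simp [Prod.map, PySem.List.slice_natCast])

-- ===== VERDICT (by name: the statement is the Claim_ definition above) =====
theorem split_on_and_py_spec : Claim_equal_split_on_and_py := by
  intro argv _
  unfold Spec_split_on_and_py
  rw [A_eq_sAux, B_eq_sAux]
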